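-- pv_equiv track=rewrite | github.com/Herambchaudhari/Ai-Interviewer-Main | backend/services/context_assembler.py | build_portfolio_summary
-- ===== SOURCE A (Python) =====
-- def build_portfolio_summary(portfolio_files: list) -> str:
--     """
--     Returns a human-readable summary of portfolio files for prompt injection.
--     Groups by category.
--     """
--     if not portfolio_files:
--         return ""
--
--     by_cat: dict[str, list] = {}
--     for f in portfolio_files:
--         cat = f.get("file_category", "other")
--         by_cat.setdefault(cat, []).append(f)
--
--     lines = ["\nPORTFOLIO & CREDENTIALS"]
--     lines.append("─────────────────────────────────────────")
--
--     cat_labels = {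
--         "grade_card":      "Grade Cards",
--         "publication":     "Publications",
--         "project_report":  "Project Reports",
--         "other":           "Other Files",
--     }
--     for cat, files in by_cat.items():
--         label = cat_labels.get(cat, cat.replace("_", " ").title())
--         for f in files:
--             sem = f.get("semester_year", "")
--             title = f.get("title", "")
--             entry = f"  • [{label}] {title}"
--             if sem:
--                 entry += f" ({sem})"
--             lines.append(entry)
--
--     lines.append("")
--     return "\n".join(lines)
-- ===== SOURCE B (Python) =====
-- def build_portfolio_summary(portfolio_files: list) -> str:
--     """
--     Returns a human-readable summary of portfolio files for prompt injection.
--     Groups by category (first-appearance order) without building a dict of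
--     lists: repeatedly emit all files of the first remaining category, then
--     drop them, until no files remain.
--     """
--     if not portfolio_files:
--         return ""
--
--     cat_labels = {
--         "grade_card":      "Grade Cards",
--         "publication":     "Publications",
--         "project_report":  "Project Reports",
--         "other":           "Other Files",
--     }
--
--     out = "\nPORTFOLIO & CREDENTIALS\n─────────────────────────────────────────\n"
--     remaining = portfolio_files
--     while remaining:
--         cat = remaining[0].get("file_category", "other")
--         label = cat_labels.get(cat, cat.replace("_", " ").title())
--         nxt = []
--         for f in remaining:
--             if f.get("file_category", "other") == cat:
--                 entry = "  • [" + label + "] " + f.get("title", "")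
--                 sem = f.get("semester_year", "")
--                 if sem:
--                     entry += " (" + sem + ")"
--                 out = out + entry + "\n"
--             else:
--                 nxt.append(f)
--         remaining = nxt
--     return out
-- ===== Notes on version B (the rewrite author's own statement) =====
-- stated objective: alternative
-- what changed: Replaced A's dict-of-lists grouping pass followed by a nested loop over dict items (joined at the end) with a partition loop that repeatedly emits the entries of the first remaining category and drops those files, accumulating the output string directly.
import Mathlib
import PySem

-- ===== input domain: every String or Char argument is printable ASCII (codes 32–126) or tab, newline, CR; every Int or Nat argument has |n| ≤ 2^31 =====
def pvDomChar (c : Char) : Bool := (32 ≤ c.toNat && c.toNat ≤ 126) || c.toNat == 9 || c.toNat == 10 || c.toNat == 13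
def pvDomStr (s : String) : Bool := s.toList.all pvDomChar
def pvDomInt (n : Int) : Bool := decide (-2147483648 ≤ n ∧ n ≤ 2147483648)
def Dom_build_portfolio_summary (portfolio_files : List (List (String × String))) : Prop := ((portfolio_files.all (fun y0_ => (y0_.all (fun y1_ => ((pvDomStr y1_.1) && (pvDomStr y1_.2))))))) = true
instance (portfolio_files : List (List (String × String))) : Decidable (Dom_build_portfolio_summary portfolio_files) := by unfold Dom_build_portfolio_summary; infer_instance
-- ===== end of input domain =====

-- B replaces A's dict-of-lists grouping pass + nested items loop by a partition loop that
-- repeatedly emits all files of the first remaining category and drops them (objective: alternative).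

-- ---- shared Python-builtin helpers (dict .get; str.title, which PySem lacks) ----

-- f.get(k, dflt): first-match lookup in the association list (the dict argument)
def pyGet (f : List (String × String)) (k dflt : String) : String :=
  (PySem.Dict.mk f).getD k dflt

-- str.title(), hand-ported (exact on the ASCII domain, where cased characters = letters):
-- a letter after a non-letter is uppercased, a letter after a letter is lowercased.
def titleGo : List Char → Bool → List Char
  | [], _ => []
  | c :: cs, prev =>
    (if PySem.Chars.isalpha c then
       (if prev then PySem.Chars.lowerChar c else PySem.Chars.upperChar c)
     else c) :: titleGo cs (PySem.Chars.isalpha c)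

def pyTitle (s : String) : String := String.ofList (titleGo s.toList false)

-- ===== PORT A =====

-- cat_labels.get(cat, cat.replace("_", " ").title())
def labelA (cat : String) : String :=
  (PySem.Dict.ofList [("grade_card", "Grade Cards"), ("publication", "Publications"),
                      ("project_report", "Project Reports"), ("other", "Other Files")]).getD
    cat (pyTitle (PySem.Str.replace cat "_" " "))

-- loop body of A's inner 'for f in files'
def entryA (label : String) (f : List (String × String)) : String :=
  let sem := pyGet f "semester_year" ""
  let title := pyGet f "title" ""
  let entry := "  • [" ++ label ++ "] " ++ title
  if sem ≠ "" then entry ++ " (" ++ sem ++ ")" else entry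

def build_portfolio_summary (portfolio_files : List (List (String × String))) : String :=
  if portfolio_files = [] then ""
  else
    let by_cat := portfolio_files.foldl
      (fun d f => d.modify (pyGet f "file_category" "other") [] (· ++ [f])) PySem.Dict.empty
    let lines := ["\nPORTFOLIO & CREDENTIALS", "─────────────────────────────────────────"]
    let lines := by_cat.items.foldl
      (fun lines cf =>
        let label := labelA cf.1
        cf.2.foldl (fun lines f => lines ++ [entryA label f]) lines)
      lines
    PySem.Str.join "\n" (lines ++ [""])

-- ===== PORT B =====

def labelB (cat : String) : String :=
  (PySem.Dict.ofList [("grade_card", "Grade Cards"), ("publication", "Publications"),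
                      ("project_report", "Project Reports"), ("other", "Other Files")]).getD
    cat (pyTitle (PySem.Str.replace cat "_" " "))

-- entry built in B's matching branch
def entryB (label : String) (f : List (String × String)) : String :=
  let entry := "  • [" ++ label ++ "] " ++ pyGet f "title" ""
  let sem := pyGet f "semester_year" ""
  if sem ≠ "" then entry ++ " (" ++ sem ++ ")" else entry

-- one step of B's single pass over 'remaining': emit the entry, or keep the file for later
def stepB (c label : String) (st : String × List (List (String × String)))
    (g : List (String × String)) : String × List (List (String × String)) :=
  if pyGet g "file_category" "other" == c then (st.1 ++ entryB label g ++ "\n", st.2)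
  else (st.1, st.2 ++ [g])

-- termination fact for bLoop: the kept files are exactly those of another category
theorem stepB_snd (c label : String) (l : List (List (String × String)))
    (s : String) (acc : List (List (String × String))) :
    (l.foldl (stepB c label) (s, acc)).2
      = acc ++ l.filter (fun g => !(pyGet g "file_category" "other" == c)) := by
  induction l generalizing s acc with
  | nil => simp
  | cons g t ih =>
    simp only [List.foldl_cons, stepB, List.filter_cons]
    by_cases h : pyGet g "file_category" "other" == c <;> simp [h, ih]

-- B's while loop
def bLoop : List (List (String × String)) → String → String
  | [], out => out
  | f :: rest, out =>
    let c := pyGet f "file_category" "other"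
    let label := labelB c
    let st := (f :: rest).foldl (stepB c label) (out, [])
    bLoop st.2 st.1
termination_by l _ => l.length
decreasing_by
  simp only [stepB_snd, List.nil_append, List.filter_cons, beq_self_eq_true,
    Bool.not_true, Bool.false_eq_true, ↓reduceIte, List.length_cons]
  exact Nat.lt_succ_of_le (List.length_filter_le _ _)

def build_portfolio_summary_alt (portfolio_files : List (List (String × String))) : String :=
  if portfolio_files = [] then ""
  else bLoop portfolio_files "\nPORTFOLIO & CREDENTIALS\n─────────────────────────────────────────\n"

-- ===== PRECONDITION & SPEC =====
def Spec_build_portfolio_summary (portfolio_files : List (List (String × String))) (out : String) : Prop := out = build_portfolio_summary_alt portfolio_files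
instance (portfolio_files : List (List (String × String))) (out : String) : Decidable (Spec_build_portfolio_summary portfolio_files out) := by unfold Spec_build_portfolio_summary; infer_instance

-- ===== CLAIM (what is proved, stated in full; the proofs are below) =====
def Claim_equal_build_portfolio_summary : Prop := ∀ (portfolio_files : List (List (String × String))), Dom_build_portfolio_summary portfolio_files → Spec_build_portfolio_summary portfolio_files (build_portfolio_summary portfolio_files)

-- ===== LEMMAS AND PROOFS =====

-- the category of a file (proof-side name for the expression both ports inline)
def catOf (f : List (String × String)) : String := pyGet f "file_category" "other"

-- the entry block "e1\n e2\n …" of a list of entry lines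
def joinNl (es : List String) : String := es.foldr (fun e a => e ++ ("\n" ++ a)) ""

-- the canonical entry-line list: categories in first-appearance order, files filtered from l
def Elist (l : List (List (String × String))) : List String :=
  (PySem.List.dedup (l.map catOf)).flatMap
    (fun c => (l.filter (fun f => catOf f == c)).map (entryA (labelA c)))

theorem joinNl_append (xs ys : List String) :
    joinNl (xs ++ ys) = joinNl xs ++ joinNl ys := by
  induction xs with
  | nil => simp [joinNl]
  | cons x t ih =>
    simp only [joinNl, List.foldr_cons, List.cons_append] at *
    rw [ih]
    simp [String.append_assoc]

theorem join_cons_of_ne_nil (x : String) (ys : List String) (h : ys ≠ []) :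
    PySem.Str.join "\n" (x :: ys) = x ++ "\n" ++ PySem.Str.join "\n" ys := by
  cases ys with
  | nil => exact absurd rfl h
  | cons y t =>
    apply String.toList_inj.mp
    simp [PySem.Str.toList_join, PySem.Chars.join_cons_cons]

theorem join_append_empty (E : List String) :
    PySem.Str.join "\n" (E ++ [""]) = joinNl E := by
  induction E with
  | nil => apply String.toList_inj.mp; simp [PySem.Str.toList_join, joinNl]
  | cons e t ih =>
    rw [List.cons_append, join_cons_of_ne_nil e _ (by simp), ih]
    simp only [joinNl, List.foldr_cons, String.append_assoc]

-- filtering commutes with first-occurrence deduplication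
theorem filter_ofList (p : String → Bool) (xs : List String) (s : PySem.Set String) :
    List.filter p (List.foldl PySem.Set.add s xs)
      = List.foldl PySem.Set.add (List.filter p s) (List.filter p xs) := by
  induction xs generalizing s with
  | nil => simp
  | cons x t ih =>
    simp only [List.foldl_cons, List.filter_cons]
    by_cases hp : p x = true
    · have hadd : List.filter p (PySem.Set.add s x) = PySem.Set.add (List.filter p s) x := by
        by_cases h : x ∈ s
        · have h2 : x ∈ List.filter p s := (List.mem_filter).mpr ⟨h, hp⟩
          simp [PySem.Set.add, h, h2]
        · have h2 : x ∉ List.filter p s := fun hx => h (List.mem_filter.mp hx).1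
          simp [PySem.Set.add, h, h2, List.filter_append, hp]
      rw [ih, hadd]; simp [hp]
    · have hadd : List.filter p (PySem.Set.add s x) = List.filter p s := by
        simp only [Bool.not_eq_true] at hp
        by_cases h : x ∈ s <;> simp [PySem.Set.add, h, List.filter_append, hp]
      rw [ih, hadd]; simp only [Bool.not_eq_true] at hp; simp [hp]

-- dedup recursion: first element, then dedup of the rest with its occurrences removed
theorem dedup_cons_filter (c : String) (xs : List String) :
    PySem.List.dedup (c :: xs) = c :: PySem.List.dedup (xs.filter (fun x => !(x == c))) := by
  simp only [pysem]
  unfold PySem.Set.discard PySem.Set.ofList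
  rw [filter_ofList]
  rfl

-- A's grouping dict, characterised
theorem items_by_cat (pf : List (List (String × String))) :
    (pf.foldl (fun d f => d.modify (pyGet f "file_category" "other") [] (· ++ [f]))
        PySem.Dict.empty).items
      = (PySem.List.dedup (pf.map catOf)).map
          (fun c => (c, pf.filter (fun f => catOf f == c))) := by
  set d := pf.foldl (fun d f => d.modify (pyGet f "file_category" "other") [] (· ++ [f]))
        PySem.Dict.empty with hd
  have hkeys : d.keys = PySem.List.dedup (pf.map catOf) := by
    rw [hd, PySem.Dict.keys_foldl_modify_key pf (fun f => pyGet f "file_category" "other") []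
      (fun _ f => (· ++ [f])) PySem.Dict.empty]
    simp [pysem, PySem.Set.ofList, List.foldl_map, catOf]
  have hnodup : d.keys.Nodup := by
    rw [hd]
    exact PySem.Dict.nodup_keys_foldl_modify_key pf (fun f => pyGet f "file_category" "other") []
      (fun _ f => (· ++ [f])) PySem.Dict.empty (by simp [pysem])
  have hgetD : ∀ c, d.getD c [] = pf.filter (fun f => catOf f == c) := by
    intro c
    have hmap : d = (pf.map (fun f => (catOf f, f))).foldl
        (fun d p => d.modify p.1 [] (· ++ [p.2])) PySem.Dict.empty := by
      rw [hd, List.foldl_map]; rfl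
    rw [hmap, PySem.Dict.getD_foldl_modify_append]
    simp [List.filter_map, Function.comp_def]
  rw [PySem.Dict.items_eq_map_keys d hnodup [], hkeys]
  exact List.map_congr_left (fun k _ => by rw [hgetD k])

-- A's result on a nonempty list
set_option maxRecDepth 40000 in
theorem A_eq_canonical (pf : List (List (String × String))) (h : pf ≠ []) :
    build_portfolio_summary pf
      = "\nPORTFOLIO & CREDENTIALS\n─────────────────────────────────────────\n" ++ joinNl (Elist pf) := by
  unfold build_portfolio_summary
  rw [if_neg h]
  simp only [items_by_cat, List.foldl_map, PySem.List.foldl_append_singleton_eq_map,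
    PySem.List.foldl_append_eq_flatMap]
  rw [join_append_empty, joinNl_append]
  have : joinNl ["\nPORTFOLIO & CREDENTIALS", "─────────────────────────────────────────"]
      = "\nPORTFOLIO & CREDENTIALS\n─────────────────────────────────────────\n" := by rfl
  rw [this]
  rfl

-- B's pass: the emitted part of the state
theorem stepB_fst (c label : String) (l : List (List (String × String)))
    (s : String) (acc : List (List (String × String))) :
    (l.foldl (stepB c label) (s, acc)).1
      = s ++ joinNl ((l.filter (fun g => pyGet g "file_category" "other" == c)).map (entryB label)) := by
  induction l generalizing s acc with
  | nil => simp [joinNl, String.append_empty]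
  | cons g t ih =>
    simp only [List.foldl_cons, stepB, List.filter_cons]
    by_cases h : pyGet g "file_category" "other" == c
    · simp only [h, ↓reduceIte, List.map_cons]
      rw [ih]
      simp only [joinNl, List.foldr_cons, String.append_assoc]
    · simp only [h, Bool.false_eq_true, ↓reduceIte]
      rw [ih]

-- B's loop computes the canonical entry block
theorem bLoop_eq_canonical (r : List (List (String × String))) (out : String) :
    bLoop r out = out ++ joinNl (Elist r) := by
  induction r, out using bLoop.induct with
  | case1 out =>
    rw [bLoop]
    simp [Elist, joinNl, String.append_empty]
  | case2 f rest out c label st ih =>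
    rw [bLoop]
    have hsnd : st.2 = rest.filter (fun g => !(catOf g == c)) := by
      rw [stepB_snd]
      simp [catOf, c]
    have hfst : st.1 = out ++ joinNl (((f :: rest).filter (fun g => catOf g == c)).map
        (entryA (labelA c))) := by
      rw [stepB_fst]
      rfl
    have hsplit : Elist (f :: rest)
        = ((f :: rest).filter (fun g => catOf g == c)).map (entryA (labelA c))
          ++ Elist st.2 := by
      have hcats : (rest.map catOf).filter (fun x => !(x == c)) = st.2.map catOf := by
        rw [hsnd, List.filter_map]; rfl
      have hdedup : PySem.List.dedup ((f :: rest).map catOf)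
          = c :: PySem.List.dedup (st.2.map catOf) := by
        rw [List.map_cons, show catOf f = c from rfl, dedup_cons_filter, hcats]
      unfold Elist
      rw [hdedup, List.flatMap_cons]
      congr 1
      apply List.flatMap_congr
      intro c' hc'
      have hc'ne : c' ≠ c := by
        rcases (PySem.List.mem_dedup _ _).mp hc' with hmem
        rcases List.mem_map.mp hmem with ⟨g, hg, rfl⟩
        rw [hsnd] at hg
        have := (List.mem_filter.mp hg).2
        simpa using this
      congr 1
      rw [hsnd, List.filter_filter]
      have hhead : (catOf f == c') = false := by
        have hcf : catOf f = c := rfl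
        simp only [hcf, beq_eq_false_iff_ne, ne_eq]
        exact fun hEq => hc'ne hEq.symm
      rw [List.filter_cons]
      simp only [hhead, Bool.false_eq_true, ↓reduceIte]
      apply List.filter_congr
      intro g _
      by_cases hg : catOf g == c'
      · have : ¬ (catOf g == c) = true := by
          simp only [beq_iff_eq] at hg ⊢
          rw [hg]; exact fun hEq => hc'ne hEq
        simp [hg, this]
      · simp [hg]
    rw [ih, hfst, hsplit, joinNl_append, String.append_assoc]

-- ===== VERDICT (by name: the statement is the Claim_ definition above) =====
theorem build_portfolio_summary_spec : Claim_equal_build_portfolio_summary := by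
  intro pf _
  unfold Spec_build_portfolio_summary build_portfolio_summary_alt
  by_cases h : pf = []
  · simp [h, build_portfolio_summary]
  · rw [if_neg h, bLoop_eq_canonical, A_eq_canonical pf h]
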